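-- pv_equiv track=rewrite | github.com/stong/flare-on-2024-writeups | 10-catbert/solve3.py | solve_lcg_xor
-- ===== SOURCE A (Python) =====
-- def solve_lcg_xor(target):
--     """Solve the fourth check - LCG with XOR"""
--     target &= 0xFFFFFFFFFFFF
--     lcg_mult = (0x0100 << 0x0010) | 0x0193
--     lcg_state = (0x811C << 0x0010) | 0x9DC5
--     lcg_mod = 0x0001 << 0x0020
--     result = []
--
--     # Work forwards, XORing each byte as we go
--     state = lcg_state
--     for i in range(16):
--         state = (state * lcg_mult) % lcg_mod
--         needed_byte = (state ^ target) & 0xFF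
--         result.append(needed_byte)
--
--     return result
-- ===== SOURCE B (Python) =====
-- # The LCG never depends on the input: its 16 states are fixed constants.
-- # Table precomputed once: state_i = seed * mult^(i+1) mod 2^32 with
-- # mult = 0x01000193, seed = 0x811C9DC5 (FNV constants), mod = 2^32.
-- _LCG_STATES = [84696351, 292984781, 1253111735, 1268118805, 303091727,
--                2138539933, 1177189415, 2615243109, 3370484223, 1078699117,
--                2752763799, 3795608245, 3658441455, 892911165, 89356807,
--                1768495365]
--
-- def solve_lcg_xor(target):
--     """Solve the fourth check - LCG with XOR"""
--     target &= 0xFFFFFFFFFFFF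
--     return [(s ^ target) & 0xFF for s in _LCG_STATES]
-- ===== Notes on version B (the rewrite author's own statement) =====
-- stated objective: simpler
-- what changed: B eliminates the LCG recurrence entirely: the states are input-independent, so they are precomputed once into a constant table and the function is a single map XORing each table entry with the masked target.
import Mathlib
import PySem

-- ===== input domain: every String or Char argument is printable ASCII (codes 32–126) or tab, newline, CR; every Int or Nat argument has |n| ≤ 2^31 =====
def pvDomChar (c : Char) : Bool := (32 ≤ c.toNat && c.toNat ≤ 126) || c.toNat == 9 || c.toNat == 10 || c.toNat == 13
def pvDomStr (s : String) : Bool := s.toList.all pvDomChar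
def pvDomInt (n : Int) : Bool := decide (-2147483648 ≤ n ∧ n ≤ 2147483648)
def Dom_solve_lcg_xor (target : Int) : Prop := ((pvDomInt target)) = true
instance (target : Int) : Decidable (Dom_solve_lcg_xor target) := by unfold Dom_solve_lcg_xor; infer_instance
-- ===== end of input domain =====

-- B replaces the per-call LCG recurrence by a precomputed constant table of the input-independent states (no multiplications per call).


-- ===== PORT A =====
-- A: iterative LCG, running state updated each of 16 iterations
def solve_lcg_xor (target : Int) : List Int :=
  let target := PySem.Int.band target 0xFFFFFFFFFFFF
  let lcg_mult : Int := PySem.Int.bor (((0x0100 : Int) <<< (0x0010 : Nat))) 0x0193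
  let lcg_state : Int := PySem.Int.bor (((0x811C : Int) <<< (0x0010 : Nat))) 0x9DC5
  let lcg_mod : Int := ((0x0001 : Int) <<< (0x0020 : Nat))
  let f := fun (acc : Int × List Int) (_ : Int) =>
    let state := PySem.Int.mod (acc.1 * lcg_mult) lcg_mod
    (state, acc.2 ++ [PySem.Int.band (PySem.Int.bxor state target) 0xFF])
  ((PySem.List.pyRange 0 16 1).foldl f (lcg_state, [])).2

-- ===== PORT B =====
-- B: constant table of the 16 precomputed LCG states; one map over it
def lcgStatesTable : List Int :=
  [84696351, 292984781, 1253111735, 1268118805, 303091727,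
   2138539933, 1177189415, 2615243109, 3370484223, 1078699117,
   2752763799, 3795608245, 3658441455, 892911165, 89356807,
   1768495365]

def solve_lcg_xor_alt (target : Int) : List Int :=
  let target := PySem.Int.band target 0xFFFFFFFFFFFF
  lcgStatesTable.map (fun s => PySem.Int.band (PySem.Int.bxor s target) 0xFF)

-- ===== PRECONDITION & SPEC =====
def Spec_solve_lcg_xor (target : Int) (out : List Int) : Prop := out = solve_lcg_xor_alt target
instance (target : Int) (out : List Int) : Decidable (Spec_solve_lcg_xor target out) := by unfold Spec_solve_lcg_xor; infer_instance

-- ===== CLAIM (what is proved, stated in full; the proofs are below) =====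
def Claim_equal_solve_lcg_xor : Prop := ∀ (target : Int), Dom_solve_lcg_xor target → Spec_solve_lcg_xor target (solve_lcg_xor target)

-- ===== LEMMAS AND PROOFS =====

-- ===== VERDICT (by name: the statement is the Claim_ definition above) =====
theorem solve_lcg_xor_spec : Claim_equal_solve_lcg_xor := by
  intro target _
  unfold Spec_solve_lcg_xor solve_lcg_xor solve_lcg_xor_alt lcgStatesTable
  have hr : PySem.List.pyRange 0 16 1 = [0,1,2,3,4,5,6,7,8,9,10,11,12,13,14,15] := by decide
  simp only [hr, List.foldl_cons, List.foldl_nil, List.map_cons, List.map_nil,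
    List.cons_append, List.nil_append]
  have e0 : PySem.Int.mod (PySem.Int.bor (((0x811C : Int) <<< (0x0010 : Nat))) 0x9DC5 * PySem.Int.bor (((0x0100 : Int) <<< (0x0010 : Nat))) 0x0193) ((0x0001 : Int) <<< (0x0020 : Nat)) = 84696351 := by decide
  have e1 : PySem.Int.mod (84696351 * PySem.Int.bor (((0x0100 : Int) <<< (0x0010 : Nat))) 0x0193) ((0x0001 : Int) <<< (0x0020 : Nat)) = 292984781 := by decide
  have e2 : PySem.Int.mod (292984781 * PySem.Int.bor (((0x0100 : Int) <<< (0x0010 : Nat))) 0x0193) ((0x0001 : Int) <<< (0x0020 : Nat)) = 1253111735 := by decide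
  have e3 : PySem.Int.mod (1253111735 * PySem.Int.bor (((0x0100 : Int) <<< (0x0010 : Nat))) 0x0193) ((0x0001 : Int) <<< (0x0020 : Nat)) = 1268118805 := by decide
  have e4 : PySem.Int.mod (1268118805 * PySem.Int.bor (((0x0100 : Int) <<< (0x0010 : Nat))) 0x0193) ((0x0001 : Int) <<< (0x0020 : Nat)) = 303091727 := by decide
  have e5 : PySem.Int.mod (303091727 * PySem.Int.bor (((0x0100 : Int) <<< (0x0010 : Nat))) 0x0193) ((0x0001 : Int) <<< (0x0020 : Nat)) = 2138539933 := by decide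
  have e6 : PySem.Int.mod (2138539933 * PySem.Int.bor (((0x0100 : Int) <<< (0x0010 : Nat))) 0x0193) ((0x0001 : Int) <<< (0x0020 : Nat)) = 1177189415 := by decide
  have e7 : PySem.Int.mod (1177189415 * PySem.Int.bor (((0x0100 : Int) <<< (0x0010 : Nat))) 0x0193) ((0x0001 : Int) <<< (0x0020 : Nat)) = 2615243109 := by decide
  have e8 : PySem.Int.mod (2615243109 * PySem.Int.bor (((0x0100 : Int) <<< (0x0010 : Nat))) 0x0193) ((0x0001 : Int) <<< (0x0020 : Nat)) = 3370484223 := by decide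
  have e9 : PySem.Int.mod (3370484223 * PySem.Int.bor (((0x0100 : Int) <<< (0x0010 : Nat))) 0x0193) ((0x0001 : Int) <<< (0x0020 : Nat)) = 1078699117 := by decide
  have e10 : PySem.Int.mod (1078699117 * PySem.Int.bor (((0x0100 : Int) <<< (0x0010 : Nat))) 0x0193) ((0x0001 : Int) <<< (0x0020 : Nat)) = 2752763799 := by decide
  have e11 : PySem.Int.mod (2752763799 * PySem.Int.bor (((0x0100 : Int) <<< (0x0010 : Nat))) 0x0193) ((0x0001 : Int) <<< (0x0020 : Nat)) = 3795608245 := by decide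
  have e12 : PySem.Int.mod (3795608245 * PySem.Int.bor (((0x0100 : Int) <<< (0x0010 : Nat))) 0x0193) ((0x0001 : Int) <<< (0x0020 : Nat)) = 3658441455 := by decide
  have e13 : PySem.Int.mod (3658441455 * PySem.Int.bor (((0x0100 : Int) <<< (0x0010 : Nat))) 0x0193) ((0x0001 : Int) <<< (0x0020 : Nat)) = 892911165 := by decide
  have e14 : PySem.Int.mod (892911165 * PySem.Int.bor (((0x0100 : Int) <<< (0x0010 : Nat))) 0x0193) ((0x0001 : Int) <<< (0x0020 : Nat)) = 89356807 := by decide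
  have e15 : PySem.Int.mod (89356807 * PySem.Int.bor (((0x0100 : Int) <<< (0x0010 : Nat))) 0x0193) ((0x0001 : Int) <<< (0x0020 : Nat)) = 1768495365 := by decide
  rw [e0, e1, e2, e3, e4, e5, e6, e7, e8, e9, e10, e11, e12, e13, e14, e15]
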